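-- pv_equiv track=rewrite | github.com/MdAbedin/binarysearch | 0801 - 0900/0845 Enclosed Islands.py | solve
-- ===== SOURCE A (Python) =====
-- def solve(matrix):
--     total = sum(sum(row) for row in matrix)
--     escapable = 0
--     seen = set()
--
--     for r in range(len(matrix)):
--         for c in [0,len(matrix[0])-1]:
--             if (r,c) in seen or matrix[r][c] != 1:
--                 continue
--
--             seen.add((r,c))
--             dfs = [[r,c]]
--
--             while dfs:
--                 cr,cc = dfs.pop()
--                 escapable += 1
--
--                 for nr,nc in [[cr+1,cc],[cr-1,cc],[cr,cc+1],[cr,cc-1]]: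
--                     if 0<=nr<len(matrix) and 0<=nc<len(matrix[0]) and (nr,nc) not in seen and matrix[nr][nc] == 1:
--                         dfs.append([nr,nc])
--                         seen.add((nr,nc))
--
--     for r in [0,len(matrix)-1]:
--         for c in range(len(matrix[0])):
--             if (r,c) in seen or matrix[r][c] != 1:
--                 continue
--
--             seen.add((r,c))
--             dfs = [[r,c]]
--
--             while dfs:
--                 cr,cc = dfs.pop()
--                 escapable += 1
--
--                 for nr,nc in [[cr+1,cc],[cr-1,cc],[cr,cc+1],[cr,cc-1]]:
--                     if 0<=nr<len(matrix) and 0<=nc<len(matrix[0]) and (nr,nc) not in seen and matrix[nr][nc] == 1: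
--                         dfs.append([nr,nc])
--                         seen.add((nr,nc))
--
--     return total - escapable
-- ===== SOURCE B (Python) =====
-- def solve(matrix):
--     rows = len(matrix)
--     cols = len(matrix[0])
--     total = sum(sum(row) for row in matrix)
--     reach = set()
--     changed = True
--     while changed:
--         changed = False
--         for r in range(rows):
--             for c in range(cols):
--                 if matrix[r][c] == 1 and (r, c) not in reach and (
--                         r == 0 or r == rows - 1 or c == 0 or c == cols - 1
--                         or (r + 1, c) in reach or (r - 1, c) in reach
--                         or (r, c + 1) in reach or (r, c - 1) in reach):
--                     reach.add((r, c))
--                     changed = True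
--     return total - len(reach)
-- ===== Notes on version B (the rewrite author's own statement) =====
-- stated objective: alternative
-- what changed: A's two border-scan loops each running an explicit-stack DFS with a shared seen-set are replaced by an iterate-to-fixpoint relaxation: repeatedly sweep the whole grid marking any land cell that lies on the border or touches an already-marked cell, until a sweep changes nothing, then subtract the marked count from the total.
import Mathlib
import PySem

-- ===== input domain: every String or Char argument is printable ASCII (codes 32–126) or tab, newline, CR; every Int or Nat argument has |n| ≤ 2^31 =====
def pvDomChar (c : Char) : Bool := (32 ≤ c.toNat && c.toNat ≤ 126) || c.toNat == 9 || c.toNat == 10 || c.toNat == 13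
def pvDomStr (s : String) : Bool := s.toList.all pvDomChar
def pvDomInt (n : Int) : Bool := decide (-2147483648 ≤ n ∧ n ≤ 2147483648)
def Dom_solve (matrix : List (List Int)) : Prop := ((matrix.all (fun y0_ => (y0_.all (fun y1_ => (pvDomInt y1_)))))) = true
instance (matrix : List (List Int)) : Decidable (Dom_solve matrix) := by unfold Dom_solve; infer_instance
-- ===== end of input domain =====

-- B replaces A's border-seeded stack DFS by an iterate-to-fixpoint relaxation that
-- repeatedly sweeps the grid marking border-connected land; an alternative algorithm, not faster.

-- ===== PORT A =====
-- shared transliterations of len(matrix), len(matrix[0]), matrix[r][c], sum(sum(row) for row in matrix)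
-- (all index accesses are in range under Pre_solve; the .getD is only a totality guard)
def pvRows (matrix : List (List Int)) : Int := matrix.length
def pvCols (matrix : List (List Int)) : Int := ((PySem.List.pyGet? matrix 0).getD []).length
def pvAt (matrix : List (List Int)) (r c : Int) : Int :=
  (PySem.List.pyGet? ((PySem.List.pyGet? matrix r).getD []) c).getD 0
def pvTotal (matrix : List (List Int)) : Int :=
  matrix.foldl (fun acc row => acc + row.foldl (· + ·) 0) 0

-- one neighbour test-and-push of A's inner 'for nr,nc in [[cr+1,cc],…]' loop
def pvVisit (matrix : List (List Int)) (st : PySem.Set (Int × Int) × List (Int × Int))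
    (q : Int × Int) : PySem.Set (Int × Int) × List (Int × Int) :=
  if 0 ≤ q.1 ∧ q.1 < pvRows matrix ∧ 0 ≤ q.2 ∧ q.2 < pvCols matrix ∧ q ∉ st.1 ∧ pvAt matrix q.1 q.2 = 1 then
    (PySem.Set.add st.1 q, q :: st.2)
  else st

-- A's 'while dfs:' loop; fuel is only a totality guard (proved sufficient under Pre_solve)
def pvDfsA (matrix : List (List Int)) :
    Nat → PySem.Set (Int × Int) → Int → List (Int × Int) → Option (PySem.Set (Int × Int) × Int)
  | _, seen, esc, [] => some (seen, esc)
  | 0, _, _, _ :: _ => none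
  | fuel + 1, seen, esc, p :: rest =>
      let st := [(p.1 + 1, p.2), (p.1 - 1, p.2), (p.1, p.2 + 1), (p.1, p.2 - 1)].foldl
        (pvVisit matrix) (seen, rest)
      pvDfsA matrix fuel st.1 (esc + 1) st.2

def pvFuelA (matrix : List (List Int)) : Nat :=
  2 * matrix.length * ((PySem.List.pyGet? matrix 0).getD []).length + 2

-- the body of A's two seeding loops
def pvSeed (matrix : List (List Int)) (st : Option (PySem.Set (Int × Int) × Int)) (r c : Int) :
    Option (PySem.Set (Int × Int) × Int) :=
  match st with
  | none => none
  | some (seen, esc) =>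
      if (r, c) ∈ seen ∨ pvAt matrix r c ≠ 1 then some (seen, esc)
      else pvDfsA matrix (pvFuelA matrix) (PySem.Set.add seen (r, c)) esc [(r, c)]

def solve (matrix : List (List Int)) : Int :=
  let total := pvTotal matrix
  let st1 := (PySem.List.pyRange 0 (pvRows matrix) 1).foldl
      (fun st r => [(0 : Int), pvCols matrix - 1].foldl (fun st c => pvSeed matrix st r c) st)
      (some (PySem.Set.empty, 0))
  let st2 := [(0 : Int), pvRows matrix - 1].foldl
      (fun st r => (PySem.List.pyRange 0 (pvCols matrix) 1).foldl (fun st c => pvSeed matrix st r c) st) st1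
  match st2 with
  | some (_, esc) => total - esc
  | none => 0   -- unreachable under Pre_solve (fuel shown sufficient below)

-- ===== PORT B =====
-- body of B's innermost 'if': mark a land cell that is on the border or next to a marked cell
def pvStepB (matrix : List (List Int)) (st : PySem.Set (Int × Int) × Bool) (r c : Int) :
    PySem.Set (Int × Int) × Bool :=
  if pvAt matrix r c = 1 ∧ (r, c) ∉ st.1 ∧
      (r = 0 ∨ r = pvRows matrix - 1 ∨ c = 0 ∨ c = pvCols matrix - 1 ∨
       (r + 1, c) ∈ st.1 ∨ (r - 1, c) ∈ st.1 ∨ (r, c + 1) ∈ st.1 ∨ (r, c - 1) ∈ st.1) then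
    (PySem.Set.add st.1 (r, c), true)
  else st

-- one whole-grid sweep, starting with changed = False
def pvSweepB (matrix : List (List Int)) (reach : PySem.Set (Int × Int)) :
    PySem.Set (Int × Int) × Bool :=
  (PySem.List.pyRange 0 (pvRows matrix) 1).foldl
    (fun st r => (PySem.List.pyRange 0 (pvCols matrix) 1).foldl (fun st c => pvStepB matrix st r c) st)
    (reach, false)

-- B's 'while changed:' loop; fuel is only a totality guard (proved sufficient)
def pvLoopB (matrix : List (List Int)) : Nat → PySem.Set (Int × Int) → PySem.Set (Int × Int)
  | 0, reach => reach
  | fuel + 1, reach =>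
      let st := pvSweepB matrix reach
      if st.2 then pvLoopB matrix fuel st.1 else st.1

def solve_alt (matrix : List (List Int)) : Int :=
  pvTotal matrix -
    (pvLoopB matrix (matrix.length * ((PySem.List.pyGet? matrix 0).getD []).length + 1) PySem.Set.empty).length

-- ===== PRECONDITION & SPEC =====
-- Pre_solve is exactly the set of inputs on which the Python A returns: a nonempty matrix whose
-- first row is nonempty and every row is at least as long as the first (A indexes each row at
-- columns 0 .. len(matrix[0])-1 and raises IndexError otherwise).
def Pre_solve (matrix : List (List Int)) : Prop :=
  matrix ≠ [] ∧ 0 < ((PySem.List.pyGet? matrix 0).getD []).length ∧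
    ∀ row ∈ matrix, ((PySem.List.pyGet? matrix 0).getD []).length ≤ row.length
instance (matrix : List (List Int)) : Decidable (Pre_solve matrix) := by unfold Pre_solve; infer_instance

def pvWitness_solve : List (List Int) := [[1, 0, 2], [0, 1, 0], [0, 0, 1]]

def Spec_solve (matrix : List (List Int)) (out : Int) : Prop := out = solve_alt matrix
instance (matrix : List (List Int)) (out : Int) : Decidable (Spec_solve matrix out) := by unfold Spec_solve; infer_instance

-- ===== CLAIM (what is proved, stated in full; the proofs are below) =====
def Claim_equal_solve : Prop :=
  ∀ (matrix : List (List Int)), Dom_solve matrix → Pre_solve matrix → Spec_solve matrix (solve matrix)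


-- ===== LEMMAS AND PROOFS =====

-- abbreviations used only by the proofs
def pvN (m : List (List Int)) : Nat := m.length * ((PySem.List.pyGet? m 0).getD []).length

def pvInB (m : List (List Int)) (p : Int × Int) : Prop :=
  0 ≤ p.1 ∧ p.1 < pvRows m ∧ 0 ≤ p.2 ∧ p.2 < pvCols m

def pvLand (m : List (List Int)) (p : Int × Int) : Prop := pvAt m p.1 p.2 = 1

def pvNbrs (p : Int × Int) : List (Int × Int) :=
  [(p.1 + 1, p.2), (p.1 - 1, p.2), (p.1, p.2 + 1), (p.1, p.2 - 1)]

def pvBorder (m : List (List Int)) (p : Int × Int) : Prop :=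
  p.1 = 0 ∨ p.1 = pvRows m - 1 ∨ p.2 = 0 ∨ p.2 = pvCols m - 1

-- land cells connected through land to a border land cell: the common characterisation
inductive pvReach (m : List (List Int)) : Int × Int → Prop
  | seed (p : Int × Int) : pvInB m p → pvBorder m p → pvLand m p → pvReach m p
  | step (p q : Int × Int) : pvReach m p → q ∈ pvNbrs p → pvInB m q → pvLand m q → pvReach m q

lemma pvMem_nbrs_iff (a b x y : Int) :
    (x, y) ∈ pvNbrs (a, b) ↔ (x = a + 1 ∧ y = b) ∨ (x = a - 1 ∧ y = b) ∨ (x = a ∧ y = b + 1) ∨ (x = a ∧ y = b - 1) := by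
  simp [pvNbrs, Prod.ext_iff]

lemma pvCard (m : List (List Int)) (l : List (Int × Int)) (hnd : l.Nodup)
    (h : ∀ p ∈ l, pvInB m p) : l.length ≤ pvN m := by
  classical
  have hsub : l.toFinset ⊆ Finset.Ico (0 : ℤ) (pvRows m) ×ˢ Finset.Ico (0 : ℤ) (pvCols m) := by
    intro p hp
    have hp' := h p (by simpa [List.mem_toFinset] using hp)
    simp only [Finset.mem_product, Finset.mem_Ico]
    exact ⟨⟨hp'.1, hp'.2.1⟩, hp'.2.2.1, hp'.2.2.2⟩
  have hcard := Finset.card_le_card hsub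
  rw [List.toFinset_card_of_nodup hnd] at hcard
  simpa [Finset.card_product, Int.card_Ico, pvRows, pvCols, pvN] using hcard

lemma pvClosed_mono (m : List (List Int)) (s t : List (Int × Int)) (hst : ∀ x ∈ s, x ∈ t)
    (p : Int × Int) (h : ∀ q ∈ pvNbrs p, pvInB m q → pvLand m q → q ∈ s) :
    ∀ q ∈ pvNbrs p, pvInB m q → pvLand m q → q ∈ t :=
  fun q hq hin hl => hst q (h q hq hin hl)

-- the invariant carried by A's seeding/DFS loops
def pvInvA (m : List (List Int)) (seen : List (Int × Int)) (esc : Int) (stack : List (Int × Int)) : Prop :=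
  seen.Nodup ∧ (∀ p ∈ seen, pvInB m p) ∧ (∀ p ∈ stack, p ∈ seen) ∧
    esc + (stack.length : Int) = (seen.length : Int) ∧ (∀ p ∈ seen, pvReach m p) ∧
    (∀ p ∈ seen, p ∈ stack ∨ ∀ q ∈ pvNbrs p, pvInB m q → pvLand m q → q ∈ seen)

-- one pass of the neighbour loop: everything it guarantees, in one induction
lemma pvVisitFold (m : List (List Int)) (p0 : Int × Int) (hp0 : pvReach m p0) :
    ∀ (L : List (Int × Int)), (∀ q ∈ L, q ∈ pvNbrs p0) →
    ∀ (seen : PySem.Set (Int × Int)) (stack : List (Int × Int)), seen.Nodup →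
      (∀ p ∈ seen, pvInB m p) → (∀ p ∈ seen, pvReach m p) →
      (L.foldl (pvVisit m) (seen, stack)).1.Nodup ∧
      (∀ p ∈ (L.foldl (pvVisit m) (seen, stack)).1, pvInB m p) ∧
      (∀ p ∈ (L.foldl (pvVisit m) (seen, stack)).1, pvReach m p) ∧
      ((L.foldl (pvVisit m) (seen, stack)).1.length + stack.length
        = seen.length + (L.foldl (pvVisit m) (seen, stack)).2.length) ∧
      (∀ p ∈ seen, p ∈ (L.foldl (pvVisit m) (seen, stack)).1) ∧
      (∀ p ∈ stack, p ∈ (L.foldl (pvVisit m) (seen, stack)).2) ∧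
      (∀ p ∈ (L.foldl (pvVisit m) (seen, stack)).2, p ∈ stack ∨ p ∈ (L.foldl (pvVisit m) (seen, stack)).1) ∧
      (∀ q ∈ L, pvInB m q → pvLand m q → q ∈ (L.foldl (pvVisit m) (seen, stack)).1) ∧
      (∀ p ∈ (L.foldl (pvVisit m) (seen, stack)).1, p ∈ seen ∨ p ∈ (L.foldl (pvVisit m) (seen, stack)).2) ∧
      (stack.length ≤ (L.foldl (pvVisit m) (seen, stack)).2.length) := by
  intro L
  induction L with
  | nil =>
      intro _ seen stack h1 h2 h3
      refine ⟨h1, h2, h3, rfl, fun p hp => hp, fun p hp => hp, fun p hp => Or.inl hp,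
        by simp, fun p hp => Or.inl hp, le_refl _⟩
  | cons q L ih =>
      intro hL seen stack h1 h2 h3
      have hqn : q ∈ pvNbrs p0 := hL q (by simp)
      have hL' : ∀ r ∈ L, r ∈ pvNbrs p0 := fun r hr => hL r (by simp [hr])
      simp only [List.foldl_cons]
      by_cases hc : 0 ≤ q.1 ∧ q.1 < pvRows m ∧ 0 ≤ q.2 ∧ q.2 < pvCols m ∧ q ∉ seen ∧ pvAt m q.1 q.2 = 1
      · have hv : pvVisit m (seen, stack) q = (PySem.Set.add seen q, q :: stack) := by
          simp only [pvVisit]; rw [if_pos hc]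
        rw [hv]
        have hadd : PySem.Set.add seen q = seen ++ [q] := PySem.Set.add_of_not_mem hc.2.2.2.2.1
        have hqin : pvInB m q := ⟨hc.1, hc.2.1, hc.2.2.1, hc.2.2.2.1⟩
        have hql : pvLand m q := hc.2.2.2.2.2
        have hqr : pvReach m q := pvReach.step p0 q hp0 hqn hqin hql
        have h1' : (PySem.Set.add seen q).Nodup := PySem.Set.nodup_add seen q h1
        have h2' : ∀ p ∈ PySem.Set.add seen q, pvInB m p := by
          intro p hp; rcases (PySem.Set.mem_add seen q p).1 hp with h | h
          · exact h2 p h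
          · exact h ▸ hqin
        have h3' : ∀ p ∈ PySem.Set.add seen q, pvReach m p := by
          intro p hp; rcases (PySem.Set.mem_add seen q p).1 hp with h | h
          · exact h3 p h
          · exact h ▸ hqr
        obtain ⟨g1, g2, g3, g4, g5, g6, g7, g8, g9, g10⟩ := ih hL' (PySem.Set.add seen q) (q :: stack) h1' h2' h3'
        have hlen : (PySem.Set.add seen q).length = seen.length + 1 := by
          rw [hadd]; simp
        refine ⟨g1, g2, g3, by rw [hlen] at g4; simp at g4 ⊢; omega, ?_, ?_, ?_, ?_, ?_,
          by simp at g10; omega⟩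
        · intro p hp; exact g5 p ((PySem.Set.mem_add seen q p).2 (Or.inl hp))
        · intro p hp; exact g6 p (by simp [hp])
        · intro p hp
          rcases g7 p hp with h | h
          · rcases List.mem_cons.1 h with h | h
            · exact Or.inr (h ▸ g5 q ((PySem.Set.mem_add seen q q).2 (Or.inr rfl)))
            · exact Or.inl h
          · exact Or.inr h
        · intro r hr hin hl
          rcases List.mem_cons.1 hr with h | h
          · exact h ▸ g5 q ((PySem.Set.mem_add seen q q).2 (Or.inr rfl))
          · exact g8 r h hin hl
        · intro p hp
          rcases g9 p hp with h | h
          · rcases (PySem.Set.mem_add seen q p).1 h with h' | h'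
            · exact Or.inl h'
            · exact Or.inr (h' ▸ g6 q (by simp))
          · exact Or.inr h
      · have hv : pvVisit m (seen, stack) q = (seen, stack) := by
          simp only [pvVisit]; rw [if_neg hc]
        rw [hv]
        obtain ⟨g1, g2, g3, g4, g5, g6, g7, g8, g9, g10⟩ := ih hL' seen stack h1 h2 h3
        refine ⟨g1, g2, g3, g4, g5, g6, g7, ?_, g9, g10⟩
        intro r hr hin hl
        rcases List.mem_cons.1 hr with h | h
        · subst h
          have : r ∈ seen := by
            by_contra hns
            exact hc ⟨hin.1, hin.2.1, hin.2.2.1, hin.2.2.2, hns, hl⟩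
          exact g5 r this
        · exact g8 r h hin hl

-- the DFS terminates within its fuel and preserves the invariant
lemma pvDfsA_run (m : List (List Int)) :
    ∀ (fuel : Nat) (seen : PySem.Set (Int × Int)) (esc : Int) (stack : List (Int × Int)),
      pvInvA m seen esc stack →
      2 * pvN m + stack.length + 1 ≤ fuel + 2 * seen.length →
      ∃ out, pvDfsA m fuel seen esc stack = some out ∧ pvInvA m out.1 out.2 [] ∧
        (∀ p ∈ seen, p ∈ out.1) := by
  intro fuel
  induction fuel with
  | zero =>
      intro seen esc stack hInv hfuel
      cases stack with
      | nil => exact ⟨(seen, esc), rfl, hInv, fun p hp => hp⟩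
      | cons p rest =>
          exfalso
          have := pvCard m seen hInv.1 hInv.2.1
          simp at hfuel; omega
  | succ fuel ih =>
      intro seen esc stack hInv hfuel
      cases stack with
      | nil => exact ⟨(seen, esc), rfl, hInv, fun p hp => hp⟩
      | cons p rest =>
          obtain ⟨h1, h2, h3, h4, h5, h6⟩ := hInv
          have hp0 : pvReach m p := h5 p (h3 p (by simp))
          obtain ⟨g1, g2, g3, g4, g5, g6, g7, g8, g9, g10⟩ :=
            pvVisitFold m p hp0 (pvNbrs p) (fun q hq => hq) seen rest h1 h2 h5
          set res := (pvNbrs p).foldl (pvVisit m) (seen, rest) with hres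
          have hInv' : pvInvA m res.1 (esc + 1) res.2 := by
            refine ⟨g1, g2, ?_, ?_, g3, ?_⟩
            · intro x hx
              rcases g7 x hx with h | h
              · exact g5 x (h3 x (by simp [h]))
              · exact h
            · simp at h4 ⊢; omega
            · intro x hx
              rcases g9 x hx with h | h
              · rcases h6 x h with h' | h'
                · rcases List.mem_cons.1 h' with h'' | h''
                  · subst h''; exact Or.inr g8
                  · exact Or.inl (g6 x h'')
                · exact Or.inr (pvClosed_mono m seen res.1 g5 x h')
              · exact Or.inl h
          have hfuel' : 2 * pvN m + res.2.length + 1 ≤ fuel + 2 * res.1.length := by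
            have hg4 := g4
            have hg10 := g10
            simp at hfuel; omega
          obtain ⟨out, hout, hOutInv, hmono⟩ := ih res.1 (esc + 1) res.2 hInv' hfuel'
          refine ⟨out, ?_, hOutInv, fun x hx => hmono x (g5 x hx)⟩
          simp only [pvDfsA]
          exact hout

-- one seeding step of A's outer loops
lemma pvSeed_run (m : List (List Int)) (r c : Int) (hin : pvInB m (r, c)) (hb : pvBorder m (r, c))
    (seen : PySem.Set (Int × Int)) (esc : Int) (hInv : pvInvA m seen esc []) :
    ∃ out, pvSeed m (some (seen, esc)) r c = some out ∧ pvInvA m out.1 out.2 [] ∧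
      (∀ p ∈ seen, p ∈ out.1) ∧ (pvLand m (r, c) → (r, c) ∈ out.1) := by
  obtain ⟨h1, h2, h3, h4, h5, h6⟩ := hInv
  by_cases hc : (r, c) ∈ seen ∨ pvAt m r c ≠ 1
  · refine ⟨(seen, esc), by simp only [pvSeed]; rw [if_pos hc], ⟨h1, h2, h3, h4, h5, h6⟩,
      fun p hp => hp, ?_⟩
    intro hl
    rcases hc with h | h
    · exact h
    · exact absurd hl h
  · have hc' := not_or.1 hc
    have hns : (r, c) ∉ seen := hc'.1
    have hl : pvLand m (r, c) := not_not.1 hc'.2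
    have hadd : PySem.Set.add seen (r, c) = seen ++ [(r, c)] := PySem.Set.add_of_not_mem hns
    have hr : pvReach m (r, c) := pvReach.seed (r, c) hin hb hl
    have hInv' : pvInvA m (PySem.Set.add seen (r, c)) esc [(r, c)] := by
      refine ⟨PySem.Set.nodup_add seen (r, c) h1, ?_, ?_, ?_, ?_, ?_⟩
      · intro p hp; rcases (PySem.Set.mem_add seen (r, c) p).1 hp with h | h
        · exact h2 p h
        · exact h ▸ hin
      · intro p hp; simp at hp; subst hp
        exact (PySem.Set.mem_add seen (r, c) (r, c)).2 (Or.inr rfl)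
      · rw [hadd]; simp at h4 ⊢; omega
      · intro p hp; rcases (PySem.Set.mem_add seen (r, c) p).1 hp with h | h
        · exact h5 p h
        · exact h ▸ hr
      · intro p hp; rcases (PySem.Set.mem_add seen (r, c) p).1 hp with h | h
        · rcases h6 p h with h' | h'
          · simp at h'
          · refine Or.inr (pvClosed_mono m seen _ ?_ p h')
            intro x hx; exact (PySem.Set.mem_add seen (r, c) x).2 (Or.inl hx)
        · exact Or.inl (by simp [h])
    have hfuel : 2 * pvN m + ([( r, c)] : List (Int × Int)).length + 1
        ≤ pvFuelA m + 2 * (PySem.Set.add seen (r, c)).length := by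
      have : pvFuelA m = 2 * pvN m + 2 := by
        simp [pvFuelA, pvN]; ring
      simp [this]
    obtain ⟨out, hout, hOutInv, hmono⟩ :=
      pvDfsA_run m (pvFuelA m) (PySem.Set.add seen (r, c)) esc [(r, c)] hInv' hfuel
    refine ⟨out, ?_, hOutInv, ?_, ?_⟩
    · simp only [pvSeed]; rw [if_neg hc]; exact hout
    · intro p hp; exact hmono p ((PySem.Set.mem_add seen (r, c) p).2 (Or.inl hp))
    · intro _; exact hmono (r, c) ((PySem.Set.mem_add seen (r, c) (r, c)).2 (Or.inr rfl))

-- folding the seeding step over any list of in-bounds border cells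
lemma pvSeedFold (m : List (List Int)) :
    ∀ (SL : List (Int × Int)), (∀ s ∈ SL, pvInB m s ∧ pvBorder m s) →
    ∀ (seen : PySem.Set (Int × Int)) (esc : Int), pvInvA m seen esc [] →
    ∃ out, SL.foldl (fun st p => pvSeed m st p.1 p.2) (some (seen, esc)) = some out ∧
      pvInvA m out.1 out.2 [] ∧ (∀ p ∈ seen, p ∈ out.1) ∧
      (∀ s ∈ SL, pvLand m s → s ∈ out.1) := by
  intro SL
  induction SL with
  | nil =>
      intro _ seen esc hInv
      exact ⟨(seen, esc), rfl, hInv, fun p hp => hp, by simp⟩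
  | cons s SL ih =>
      intro hSL seen esc hInv
      obtain ⟨hin, hb⟩ := hSL s (by simp)
      obtain ⟨mid, hmid, hMidInv, hmono1, hsin⟩ := pvSeed_run m s.1 s.2 hin hb seen esc hInv
      obtain ⟨out, hout, hOutInv, hmono2, hcov⟩ :=
        ih (fun x hx => hSL x (by simp [hx])) mid.1 mid.2 hMidInv
      refine ⟨out, ?_, hOutInv, fun p hp => hmono2 p (hmono1 p hp), ?_⟩
      · simp only [List.foldl_cons, hmid]
        exact hout
      · intro x hx hl
        rcases List.mem_cons.1 hx with h | h
        · subst h; exact hmono2 x (hsin hl)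
        · exact hcov x h hl

-- a doubly nested loop is a fold over the flattened cell list
lemma pvNest {α β γ : Type} (f : α → β → γ → α) (rs : List β) (cs : β → List γ) (init : α) :
    rs.foldl (fun st r => (cs r).foldl (fun st c => f st r c) st) init
      = (rs.flatMap (fun r => (cs r).map (fun c => (r, c)))).foldl (fun st p => f st p.1 p.2) init := by
  rw [List.foldl_flatMap]
  simp [List.foldl_map]

-- A's two seed lists and the full cell list
def pvSL1 (m : List (List Int)) : List (Int × Int) :=
  (PySem.List.pyRange 0 (pvRows m) 1).flatMap (fun r => ([(0 : Int), pvCols m - 1]).map (fun c => (r, c)))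
def pvSL2 (m : List (List Int)) : List (Int × Int) :=
  ([(0 : Int), pvRows m - 1]).flatMap (fun r => (PySem.List.pyRange 0 (pvCols m) 1).map (fun c => (r, c)))
def pvCellsL (m : List (List Int)) : List (Int × Int) :=
  (PySem.List.pyRange 0 (pvRows m) 1).flatMap (fun r => (PySem.List.pyRange 0 (pvCols m) 1).map (fun c => (r, c)))

lemma pvCells_mem (m : List (List Int)) (p : Int × Int) : p ∈ pvCellsL m ↔ pvInB m p := by
  constructor
  · intro hp
    simp only [pvCellsL, List.mem_flatMap, List.mem_map] at hp
    obtain ⟨r, hr, c, hc, hrfl⟩ := hp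
    rw [PySem.List.mem_pyRange_one] at hr hc
    subst hrfl
    exact ⟨hr.1, hr.2, hc.1, hc.2⟩
  · intro h
    rcases p with ⟨a, b⟩
    simp only [pvCellsL, List.mem_flatMap, List.mem_map]
    exact ⟨a, by rw [PySem.List.mem_pyRange_one]; exact ⟨h.1, h.2.1⟩,
      b, by rw [PySem.List.mem_pyRange_one]; exact ⟨h.2.2.1, h.2.2.2⟩, rfl⟩

-- A's final state: DFS visited exactly the reachable cells, and counted them
lemma pvA_final (m : List (List Int)) (hpre : Pre_solve m) :
    ∃ out, ([(0 : Int), pvRows m - 1]).foldl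
        (fun st r => (PySem.List.pyRange 0 (pvCols m) 1).foldl (fun st c => pvSeed m st r c) st)
        ((PySem.List.pyRange 0 (pvRows m) 1).foldl
          (fun st r => ([(0 : Int), pvCols m - 1]).foldl (fun st c => pvSeed m st r c) st)
          (some (PySem.Set.empty, 0))) = some out ∧
      out.1.Nodup ∧ out.2 = (out.1.length : Int) ∧ (∀ p, p ∈ out.1 ↔ pvReach m p) := by
  obtain ⟨hne, hC, hrows⟩ := hpre
  have hR : 0 < m.length := List.length_pos_of_ne_nil hne
  have hRI : (0 : Int) < pvRows m := by simp [pvRows]; omega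
  have hCI : (0 : Int) < pvCols m := by simp [pvCols]; omega
  rw [pvNest (fun st r c => pvSeed m st r c), pvNest (fun st r c => pvSeed m st r c)]
  have hSL1 : ∀ s ∈ pvSL1 m, pvInB m s ∧ pvBorder m s := by
    intro s hs
    simp only [pvSL1, List.mem_flatMap, List.mem_map] at hs
    obtain ⟨r, hr, c, hc, hrfl⟩ := hs
    rw [PySem.List.mem_pyRange_one] at hr
    subst hrfl
    simp only [List.mem_cons, List.not_mem_nil, or_false] at hc
    rcases hc with h | h <;> subst h
    · exact ⟨⟨hr.1, hr.2, le_refl 0, hCI⟩, Or.inr (Or.inr (Or.inl rfl))⟩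
    · exact ⟨⟨hr.1, hr.2, by omega, by omega⟩, Or.inr (Or.inr (Or.inr rfl))⟩
  have hSL2 : ∀ s ∈ pvSL2 m, pvInB m s ∧ pvBorder m s := by
    intro s hs
    simp only [pvSL2, List.mem_flatMap, List.mem_map] at hs
    obtain ⟨r, hr, c, hc, hrfl⟩ := hs
    rw [PySem.List.mem_pyRange_one] at hc
    subst hrfl
    simp only [List.mem_cons, List.not_mem_nil, or_false] at hr
    rcases hr with h | h <;> subst h
    · exact ⟨⟨le_refl 0, hRI, hc.1, hc.2⟩, Or.inl rfl⟩
    · exact ⟨⟨by omega, by omega, hc.1, hc.2⟩, Or.inr (Or.inl rfl)⟩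
  have hInv0 : pvInvA m PySem.Set.empty 0 [] := by
    refine ⟨List.nodup_nil, by simp [PySem.Set.empty], by simp [PySem.Set.empty], by simp [PySem.Set.empty], by simp [PySem.Set.empty], by simp [PySem.Set.empty]⟩
  obtain ⟨mid, hmid, hMidInv, _, hcov1⟩ := pvSeedFold m (pvSL1 m) hSL1 PySem.Set.empty 0 hInv0
  obtain ⟨out, hout, hOutInv, hmono2, hcov2⟩ := pvSeedFold m (pvSL2 m) hSL2 mid.1 mid.2 hMidInv
  have hcov : ∀ p, pvInB m p → pvBorder m p → pvLand m p → p ∈ out.1 := by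
    rintro ⟨a, b⟩ hin hb hl
    rcases hb with h | h | h | h
    · refine hcov2 (a, b) ?_ hl
      simp only [pvSL2, List.mem_flatMap, List.mem_map]
      exact ⟨a, by simp; exact Or.inl h, b, by rw [PySem.List.mem_pyRange_one]; exact ⟨hin.2.2.1, hin.2.2.2⟩, rfl⟩
    · refine hcov2 (a, b) ?_ hl
      simp only [pvSL2, List.mem_flatMap, List.mem_map]
      exact ⟨a, by simp; exact Or.inr h, b, by rw [PySem.List.mem_pyRange_one]; exact ⟨hin.2.2.1, hin.2.2.2⟩, rfl⟩
    · refine hmono2 (a, b) (hcov1 (a, b) ?_ hl)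
      simp only [pvSL1, List.mem_flatMap, List.mem_map]
      exact ⟨a, by rw [PySem.List.mem_pyRange_one]; exact ⟨hin.1, hin.2.1⟩, b, by simp; exact Or.inl h, rfl⟩
    · refine hmono2 (a, b) (hcov1 (a, b) ?_ hl)
      simp only [pvSL1, List.mem_flatMap, List.mem_map]
      exact ⟨a, by rw [PySem.List.mem_pyRange_one]; exact ⟨hin.1, hin.2.1⟩, b, by simp; exact Or.inr h, rfl⟩
  obtain ⟨k1, k2, k3, k4, k5, k6⟩ := hOutInv
  refine ⟨out, ?_, k1, by simpa using k4, ?_⟩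
  · show List.foldl (fun st p => pvSeed m st p.1 p.2)
        (List.foldl (fun st p => pvSeed m st p.1 p.2) (some (PySem.Set.empty, 0)) (pvSL1 m))
        (pvSL2 m) = some out
    rw [hmid]
    simpa using hout
  intro p
  constructor
  · exact fun hp => k5 p hp
  · intro hp
    induction hp with
    | seed p hin hb hl => exact hcov p hin hb hl
    | step p q _ hq hin hl ihp =>
        rcases k6 p ihp with h | h
        · simp at h
        · exact h q hq hin hl

-- ===== B side =====

def pvCondB (m : List (List Int)) (reach : List (Int × Int)) (p : Int × Int) : Prop :=
  pvAt m p.1 p.2 = 1 ∧ p ∉ reach ∧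
    (p.1 = 0 ∨ p.1 = pvRows m - 1 ∨ p.2 = 0 ∨ p.2 = pvCols m - 1 ∨
     (p.1 + 1, p.2) ∈ reach ∨ (p.1 - 1, p.2) ∈ reach ∨ (p.1, p.2 + 1) ∈ reach ∨ (p.1, p.2 - 1) ∈ reach)

-- once the changed flag is set, it stays set
lemma pvSweep_ch (m : List (List Int)) :
    ∀ (L : List (Int × Int)) (st : PySem.Set (Int × Int) × Bool), st.2 = true →
      (L.foldl (fun st p => pvStepB m st p.1 p.2) st).2 = true := by
  intro L
  induction L with
  | nil => intro st h; exact h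
  | cons q L ih =>
      intro st h
      simp only [List.foldl_cons]
      apply ih
      simp only [pvStepB]
      split
      · rfl
      · exact h

-- everything one sweep of B guarantees
lemma pvSweepFold (m : List (List Int)) (L : List (Int × Int)) (hL : ∀ p ∈ L, pvInB m p) :
    ∀ (reach : PySem.Set (Int × Int)) (ch : Bool), reach.Nodup →
      (∀ p ∈ reach, pvInB m p) → (∀ p ∈ reach, pvReach m p) →
      (L.foldl (fun st p => pvStepB m st p.1 p.2) (reach, ch)).1.Nodup ∧
      (∀ p ∈ (L.foldl (fun st p => pvStepB m st p.1 p.2) (reach, ch)).1, pvInB m p) ∧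
      (∀ p ∈ (L.foldl (fun st p => pvStepB m st p.1 p.2) (reach, ch)).1, pvReach m p) ∧
      (∀ p ∈ reach, p ∈ (L.foldl (fun st p => pvStepB m st p.1 p.2) (reach, ch)).1) ∧
      ((L.foldl (fun st p => pvStepB m st p.1 p.2) (reach, ch)).2 = false →
        (L.foldl (fun st p => pvStepB m st p.1 p.2) (reach, ch)).1 = reach) ∧
      (ch = false → (L.foldl (fun st p => pvStepB m st p.1 p.2) (reach, ch)).2 = true →
        reach.length < (L.foldl (fun st p => pvStepB m st p.1 p.2) (reach, ch)).1.length) ∧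
      (reach.length ≤ (L.foldl (fun st p => pvStepB m st p.1 p.2) (reach, ch)).1.length) := by
  induction L with
  | nil =>
      intro reach ch h1 h2 h3
      exact ⟨h1, h2, h3, fun p hp => hp, fun _ => rfl, fun h h' => by simp [h] at h', le_refl _⟩
  | cons q L ih =>
      intro reach ch h1 h2 h3
      have hqin : pvInB m q := hL q (by simp)
      have hL' : ∀ p ∈ L, pvInB m p := fun p hp => hL p (by simp [hp])
      simp only [List.foldl_cons]
      by_cases hc : pvAt m q.1 q.2 = 1 ∧ (q.1, q.2) ∉ reach ∧
          (q.1 = 0 ∨ q.1 = pvRows m - 1 ∨ q.2 = 0 ∨ q.2 = pvCols m - 1 ∨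
           (q.1 + 1, q.2) ∈ reach ∨ (q.1 - 1, q.2) ∈ reach ∨ (q.1, q.2 + 1) ∈ reach ∨ (q.1, q.2 - 1) ∈ reach)
      · have hv : pvStepB m (reach, ch) q.1 q.2 = (PySem.Set.add reach (q.1, q.2), true) := by
          simp only [pvStepB]; rw [if_pos hc]
        rw [hv]
        have hqq : (q.1, q.2) = q := Prod.mk.eta
        have hql : pvLand m q := hc.1
        have hqr : pvReach m q := by
          rcases hc.2.2 with h | h | h | h | h | h | h | h
          · exact pvReach.seed q hqin (Or.inl h) hql
          · exact pvReach.seed q hqin (Or.inr (Or.inl h)) hql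
          · exact pvReach.seed q hqin (Or.inr (Or.inr (Or.inl h))) hql
          · exact pvReach.seed q hqin (Or.inr (Or.inr (Or.inr h))) hql
          · refine pvReach.step _ q (h3 _ h) ?_ hqin hql
            rw [show q = (q.1, q.2) from hqq.symm, pvMem_nbrs_iff]; right; left; constructor <;> ring
          · refine pvReach.step _ q (h3 _ h) ?_ hqin hql
            rw [show q = (q.1, q.2) from hqq.symm, pvMem_nbrs_iff]; left; constructor <;> ring
          · refine pvReach.step _ q (h3 _ h) ?_ hqin hql
            rw [show q = (q.1, q.2) from hqq.symm, pvMem_nbrs_iff]; right; right; right; constructor <;> ring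
          · refine pvReach.step _ q (h3 _ h) ?_ hqin hql
            rw [show q = (q.1, q.2) from hqq.symm, pvMem_nbrs_iff]; right; right; left; constructor <;> ring
        have hns : (q.1, q.2) ∉ reach := hc.2.1
        have hadd : PySem.Set.add reach (q.1, q.2) = reach ++ [(q.1, q.2)] := PySem.Set.add_of_not_mem hns
        have h1' : (PySem.Set.add reach (q.1, q.2)).Nodup := PySem.Set.nodup_add reach (q.1, q.2) h1
        have h2' : ∀ p ∈ PySem.Set.add reach (q.1, q.2), pvInB m p := by
          intro p hp; rcases (PySem.Set.mem_add reach (q.1, q.2) p).1 hp with h | h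
          · exact h2 p h
          · rw [h, hqq]; exact hqin
        have h3' : ∀ p ∈ PySem.Set.add reach (q.1, q.2), pvReach m p := by
          intro p hp; rcases (PySem.Set.mem_add reach (q.1, q.2) p).1 hp with h | h
          · exact h3 p h
          · rw [h, hqq]; exact hqr
        obtain ⟨g1, g2, g3, g4, g5, g6, g7⟩ := ih hL' (PySem.Set.add reach (q.1, q.2)) true h1' h2' h3'
        have hlen : (PySem.Set.add reach (q.1, q.2)).length = reach.length + 1 := by rw [hadd]; simp
        refine ⟨g1, g2, g3, ?_, ?_, ?_, by omega⟩
        · intro p hp; exact g4 p ((PySem.Set.mem_add reach (q.1, q.2) p).2 (Or.inl hp))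
        · intro hfalse
          have := pvSweep_ch m L (PySem.Set.add reach (q.1, q.2), true) rfl
          rw [hfalse] at this; exact absurd this (by simp)
        · intro _ _; omega
      · have hv : pvStepB m (reach, ch) q.1 q.2 = (reach, ch) := by
          simp only [pvStepB]; rw [if_neg hc]
        rw [hv]
        exact ih hL' reach ch h1 h2 h3

-- at a fixpoint the sweep condition fails everywhere
lemma pvSweepFixed (m : List (List Int)) :
    ∀ (L : List (Int × Int)) (reach : PySem.Set (Int × Int)),
      (L.foldl (fun st p => pvStepB m st p.1 p.2) (reach, false)).2 = false →
      ∀ p ∈ L, ¬ pvCondB m reach p := by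
  intro L
  induction L with
  | nil => intro reach _ p hp; simp at hp
  | cons q L ih =>
      intro reach hfix p hp
      simp only [List.foldl_cons] at hfix
      by_cases hc : pvAt m q.1 q.2 = 1 ∧ (q.1, q.2) ∉ reach ∧
          (q.1 = 0 ∨ q.1 = pvRows m - 1 ∨ q.2 = 0 ∨ q.2 = pvCols m - 1 ∨
           (q.1 + 1, q.2) ∈ reach ∨ (q.1 - 1, q.2) ∈ reach ∨ (q.1, q.2 + 1) ∈ reach ∨ (q.1, q.2 - 1) ∈ reach)
      · exfalso
        have hv : pvStepB m (reach, false) q.1 q.2 = (PySem.Set.add reach (q.1, q.2), true) := by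
          simp only [pvStepB]; rw [if_pos hc]
        rw [hv] at hfix
        have := pvSweep_ch m L (PySem.Set.add reach (q.1, q.2), true) rfl
        rw [hfix] at this; exact absurd this (by simp)
      · have hv : pvStepB m (reach, false) q.1 q.2 = (reach, false) := by
          simp only [pvStepB]; rw [if_neg hc]
        rw [hv] at hfix
        rcases List.mem_cons.1 hp with h | h
        · subst h
          intro hcond
          exact hc ⟨hcond.1, by rw [Prod.mk.eta]; exact hcond.2.1, hcond.2.2⟩
        · exact ih reach hfix p h

-- the sweep written as the flattened fold
lemma pvSweepB_eq (m : List (List Int)) (reach : PySem.Set (Int × Int)) :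
    pvSweepB m reach = (pvCellsL m).foldl (fun st p => pvStepB m st p.1 p.2) (reach, false) := by
  unfold pvSweepB pvCellsL
  rw [pvNest (fun st r c => pvStepB m st r c)]

-- B's while-loop reaches a genuine fixpoint within its fuel
lemma pvLoopB_run (m : List (List Int)) :
    ∀ (fuel : Nat) (reach : PySem.Set (Int × Int)), reach.Nodup →
      (∀ p ∈ reach, pvInB m p) → (∀ p ∈ reach, pvReach m p) →
      pvN m < fuel + reach.length →
      (pvLoopB m fuel reach).Nodup ∧
      (∀ p ∈ pvLoopB m fuel reach, pvInB m p) ∧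
      (∀ p ∈ pvLoopB m fuel reach, pvReach m p) ∧
      (∀ p ∈ reach, p ∈ pvLoopB m fuel reach) ∧
      (∀ p ∈ pvCellsL m, ¬ pvCondB m (pvLoopB m fuel reach) p) := by
  intro fuel
  induction fuel with
  | zero =>
      intro reach h1 h2 _ hfuel
      exfalso
      have := pvCard m reach h1 h2
      omega
  | succ fuel ih =>
      intro reach h1 h2 h3 hfuel
      have hLin : ∀ p ∈ pvCellsL m, pvInB m p := fun p hp => (pvCells_mem m p).1 hp
      obtain ⟨g1, g2, g3, g4, g5, g6, g7⟩ := pvSweepFold m (pvCellsL m) hLin reach false h1 h2 h3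
      rw [← pvSweepB_eq] at g1 g2 g3 g4 g5 g6 g7
      simp only [pvLoopB]
      by_cases hch : (pvSweepB m reach).2 = true
      · rw [if_pos hch]
        have hlt := g6 rfl hch
        obtain ⟨k1, k2, k3, k4, k5⟩ := ih (pvSweepB m reach).1 g1 g2 g3 (by omega)
        exact ⟨k1, k2, k3, fun p hp => k4 p (g4 p hp), k5⟩
      · rw [if_neg hch]
        have heq : (pvSweepB m reach).1 = reach := g5 (by simpa using hch)
        refine ⟨by rw [heq]; exact h1, by rw [heq]; exact h2, by rw [heq]; exact h3,
          by rw [heq]; exact fun p hp => hp, ?_⟩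
        rw [heq]
        have := pvSweepFixed m (pvCellsL m) reach (by rw [← pvSweepB_eq]; simpa using hch)
        exact this

-- B's final set is exactly the reachable set
lemma pvB_final (m : List (List Int)) :
    (pvLoopB m (pvN m + 1) PySem.Set.empty).Nodup ∧
    (∀ p, p ∈ pvLoopB m (pvN m + 1) PySem.Set.empty ↔ pvReach m p) := by
  obtain ⟨k1, k2, k3, _, k5⟩ := pvLoopB_run m (pvN m + 1) PySem.Set.empty List.nodup_nil
    (by simp [PySem.Set.empty]) (by simp [PySem.Set.empty]) (by simp [PySem.Set.empty])
  refine ⟨k1, fun p => ⟨fun hp => k3 p hp, ?_⟩⟩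
  intro hp
  induction hp with
  | seed p hin hb hl =>
      by_contra hns
      refine k5 p ((pvCells_mem m p).2 hin) ⟨hl, hns, ?_⟩
      rcases hb with h | h | h | h
      · exact Or.inl h
      · exact Or.inr (Or.inl h)
      · exact Or.inr (Or.inr (Or.inl h))
      · exact Or.inr (Or.inr (Or.inr (Or.inl h)))
  | step p q _ hq hin hl ihp =>
      by_contra hns
      refine k5 q ((pvCells_mem m q).2 hin) ⟨hl, hns, ?_⟩
      rcases q with ⟨x, y⟩
      rcases p with ⟨a, b⟩
      rcases (pvMem_nbrs_iff a b x y).1 hq with ⟨hx, hy⟩ | ⟨hx, hy⟩ | ⟨hx, hy⟩ | ⟨hx, hy⟩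
      · right; right; right; right; right; left
        rw [show ((x, y).1 - 1, (x, y).2) = (a, b) from by rw [hx, hy]; simp]; exact ihp
      · right; right; right; right; left
        rw [show ((x, y).1 + 1, (x, y).2) = (a, b) from by rw [hx, hy]; simp]; exact ihp
      · right; right; right; right; right; right; right
        rw [show ((x, y).1, (x, y).2 - 1) = (a, b) from by rw [hx, hy]; simp]; exact ihp
      · right; right; right; right; right; right; left
        rw [show ((x, y).1, (x, y).2 + 1) = (a, b) from by rw [hx, hy]; simp]; exact ihp


-- ===== VERDICT (by name: the statement is the Claim_ definition above) =====
theorem solve_spec : Claim_equal_solve := by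
  intro m _ hpre
  unfold Spec_solve
  obtain ⟨out, hout, hnd, hesc, hmem⟩ := pvA_final m hpre
  obtain ⟨knd, kmem⟩ := pvB_final m
  have hperm : out.1.Perm (pvLoopB m (pvN m + 1) PySem.Set.empty) :=
    (List.perm_ext_iff_of_nodup hnd knd).2 (fun p => by rw [hmem p, kmem p])
  have hlen : out.1.length = (pvLoopB m (pvN m + 1) PySem.Set.empty).length := hperm.length_eq
  show solve m = solve_alt m
  unfold solve solve_alt
  simp only [hout]
  rw [hesc, hlen]
  rfl
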